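-- pv_equiv track=rewrite | github.com/TanHY-Lab/geo-neuro-oncology-explorer | scripts/update_data.py | is_cns_relevant
-- ===== SOURCE A (Python) =====
-- CNS_TERMS = [
--     "glioma", "glioblastoma", "gbm", "astrocytoma", "oligodendroglioma",
--     "glial tumor", "glial tumour", "gliogenesis",
--     "brain metastas", "cerebral metastas", "intracranial metastas",
--     "leptomeningeal metastas", "secondary brain tumor", "secondary brain tumour",
--     "metastatic brain", "brain coloniz", "brm ",
--     "brain metastatic niche", "metastatic niche brain",
--     "meningioma",
--     "pituitary",
--     "schwannoma", "acoustic neuroma",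
--     "medulloblastoma", "ependymoma", "craniopharyngioma",
--     "cns lymphoma", "cns tumor", "cns tumour",
--     "intracranial tumor", "intracranial tumour", "intracranial neoplasm",
--     "brain cancer", "brain tumor", "brain tumour",
--     "neuro-oncol", "neurooncol",
--     "dipg", "pontine glioma", "choroid plexus", "neurocytoma",
-- ]
--
-- EXCLUDE_TERMS = ["skin fibrosis", "dermal fibrosis", "cardiac fibrosis"]
--
-- def is_cns_relevant(record):
--     title = record.get("title", "").lower()
--     summary = record.get("summary", "").lower()
--     combined = f"{title} {summary}"
--
--     if any(term in combined for term in CNS_TERMS):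
--         return True
--
--     if any(term in combined for term in EXCLUDE_TERMS):
--         return False
--
--     return False
-- ===== SOURCE B (Python) =====
-- CNS_TERMS = [
--     "glioma", "glioblastoma", "gbm", "astrocytoma", "oligodendroglioma",
--     "glial tumor", "glial tumour", "gliogenesis",
--     "brain metastas", "cerebral metastas", "intracranial metastas",
--     "leptomeningeal metastas", "secondary brain tumor", "secondary brain tumour",
--     "metastatic brain", "brain coloniz", "brm ",
--     "brain metastatic niche", "metastatic niche brain",
--     "meningioma",
--     "pituitary",
--     "schwannoma", "acoustic neuroma",
--     "medulloblastoma", "ependymoma", "craniopharyngioma",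
--     "cns lymphoma", "cns tumor", "cns tumour",
--     "intracranial tumor", "intracranial tumour", "intracranial neoplasm",
--     "brain cancer", "brain tumor", "brain tumour",
--     "neuro-oncol", "neurooncol",
--     "dipg", "pontine glioma", "choroid plexus", "neurocytoma",
-- ]
--
--
-- def is_cns_relevant(record):
--     # Single left-to-right scan: at each position of the combined text, test
--     # whether any CNS term starts there (multi-pattern prefix matching),
--     # instead of 41 independent substring searches.  The dead EXCLUDE branch
--     # of the original (both non-CNS paths return False) is dropped.
--     combined = record.get("title", "").lower() + " " + record.get("summary", "").lower()
--     for i in range(len(combined) + 1):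
--         if any(combined.startswith(term, i) for term in CNS_TERMS):
--             return True
--     return False
-- ===== Notes on version B (the rewrite author's own statement) =====
-- stated objective: alternative
-- what changed: Replaces 41 independent term-major substring searches (plus a dead EXCLUDE branch that also returns False) with one position-major left-to-right scan of the combined text that tests at each offset whether any CNS term starts there.
import Mathlib
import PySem

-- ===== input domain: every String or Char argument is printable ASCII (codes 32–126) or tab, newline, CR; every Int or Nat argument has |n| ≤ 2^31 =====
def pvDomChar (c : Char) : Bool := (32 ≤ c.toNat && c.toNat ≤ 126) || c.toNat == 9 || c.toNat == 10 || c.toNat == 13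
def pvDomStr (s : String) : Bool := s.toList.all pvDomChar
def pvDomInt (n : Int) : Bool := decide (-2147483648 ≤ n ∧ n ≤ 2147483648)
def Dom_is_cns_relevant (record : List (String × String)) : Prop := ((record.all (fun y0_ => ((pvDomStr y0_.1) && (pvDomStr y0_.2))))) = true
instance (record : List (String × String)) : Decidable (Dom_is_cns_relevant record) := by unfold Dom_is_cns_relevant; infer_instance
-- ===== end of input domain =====

-- B replaces A's 41 term-major substring searches (and dead EXCLUDE branch) by one
-- position-major scan testing at each offset whether some CNS term starts there (alternative).

def cnsTerms : List String := [
  "glioma", "glioblastoma", "gbm", "astrocytoma", "oligodendroglioma",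
  "glial tumor", "glial tumour", "gliogenesis",
  "brain metastas", "cerebral metastas", "intracranial metastas",
  "leptomeningeal metastas", "secondary brain tumor", "secondary brain tumour",
  "metastatic brain", "brain coloniz", "brm ",
  "brain metastatic niche", "metastatic niche brain",
  "meningioma",
  "pituitary",
  "schwannoma", "acoustic neuroma",
  "medulloblastoma", "ependymoma", "craniopharyngioma",
  "cns lymphoma", "cns tumor", "cns tumour",
  "intracranial tumor", "intracranial tumour", "intracranial neoplasm",
  "brain cancer", "brain tumor", "brain tumour",
  "neuro-oncol", "neurooncol",
  "dipg", "pontine glioma", "choroid plexus", "neurocytoma"]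

def excludeTerms : List String := ["skin fibrosis", "dermal fibrosis", "cardiac fibrosis"]

-- ===== PORT A =====
-- f-string concatenation is ported on char lists (Lean's String.append is kernel-opaque).
def is_cns_relevant (record : List (String × String)) : Bool :=
  let title := PySem.Chars.lower ((PySem.Dict.getD (PySem.Dict.mk record) "title" "").toList)
  let summary := PySem.Chars.lower ((PySem.Dict.getD (PySem.Dict.mk record) "summary" "").toList)
  let combined := title ++ ' ' :: summary
  if cnsTerms.any (fun term => PySem.Chars.isIn term.toList combined) then true
  else if excludeTerms.any (fun term => PySem.Chars.isIn term.toList combined) then false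
  else false

-- ===== PORT B =====
-- the 'for i in range(len(combined)+1)' loop of Source B as structural recursion on suffixes
def cnsScan : List Char → Bool
  | [] => cnsTerms.any (fun term => term.toList.isPrefixOf ([] : List Char))
  | c :: rest =>
      cnsTerms.any (fun term => term.toList.isPrefixOf (c :: rest)) || cnsScan rest

def is_cns_relevant_alt (record : List (String × String)) : Bool :=
  let combined := PySem.Chars.lower ((PySem.Dict.getD (PySem.Dict.mk record) "title" "").toList)
      ++ ' ' :: PySem.Chars.lower ((PySem.Dict.getD (PySem.Dict.mk record) "summary" "").toList)
  cnsScan combined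

-- ===== PRECONDITION & SPEC =====
def Spec_is_cns_relevant (record : List (String × String)) (out : Bool) : Prop := out = is_cns_relevant_alt record
instance (record : List (String × String)) (out : Bool) : Decidable (Spec_is_cns_relevant record out) := by unfold Spec_is_cns_relevant; infer_instance

-- ===== CLAIM (what is proved, stated in full; the proofs are below) =====
def Claim_equal_is_cns_relevant : Prop := ∀ (record : List (String × String)), Dom_is_cns_relevant record → Spec_is_cns_relevant record (is_cns_relevant record)

-- ===== LEMMAS AND PROOFS =====

lemma cnsScan_iff (s : List Char) :
    cnsScan s = true ↔ ∃ t ∈ cnsTerms, t.toList <:+: s := by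
  induction s with
  | nil => simp [cnsScan, List.any_eq_true]
  | cons c rest ih =>
      simp only [cnsScan, Bool.or_eq_true, List.any_eq_true,
        List.isPrefixOf_iff_prefix, ih]
      constructor
      · rintro (⟨t, ht, hp⟩ | ⟨t, ht, hi⟩)
        · exact ⟨t, ht, List.infix_cons_iff.mpr (Or.inl hp)⟩
        · exact ⟨t, ht, List.infix_cons_iff.mpr (Or.inr hi)⟩
      · rintro ⟨t, ht, hi⟩
        rcases List.infix_cons_iff.mp hi with hp | hi'
        · exact Or.inl ⟨t, ht, hp⟩
        · exact Or.inr ⟨t, ht, hi'⟩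

lemma cnsScan_eq_any (s : List Char) :
    cnsScan s = cnsTerms.any (fun term => PySem.Chars.isIn term.toList s) := by
  rcases h : cnsTerms.any (fun term => PySem.Chars.isIn term.toList s) with _ | _
  · rw [Bool.eq_false_iff]
    intro hs
    rcases (cnsScan_iff s).mp hs with ⟨t, ht, hi⟩
    have : cnsTerms.any (fun term => PySem.Chars.isIn term.toList s) = true :=
      List.any_eq_true.mpr ⟨t, ht, (PySem.Chars.isIn_iff_infix _ _).mpr hi⟩
    simp [this] at h
  · rcases List.any_eq_true.mp h with ⟨t, ht, hin⟩
    exact (cnsScan_iff s).mpr ⟨t, ht, (PySem.Chars.isIn_iff_infix _ _).mp hin⟩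

-- ===== VERDICT (by name: the statement is the Claim_ definition above) =====
theorem is_cns_relevant_spec : Claim_equal_is_cns_relevant := by
  intro record _
  unfold Spec_is_cns_relevant is_cns_relevant is_cns_relevant_alt
  rw [cnsScan_eq_any]
  simp only []
  split_ifs with h₁ h₂ <;> simp [h₁]
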